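-- pv_equiv track=rewrite | github.com/ayoubjoudii/Prog | Arithmetique/Conversion/deconv (b 10).py | deconv
-- ===== SOURCE A (Python) =====
-- def deconv(x,b):
--     c = 0
--     p = 1
--     for i in range(len(x)-1,-1,-1):
--         if "0"<=x[i]<="9":
--             c = c + int(x[i]) * p
--         else :
--             c += (ord(x[i])-55) * p
--         p *= b
--     return c
-- ===== SOURCE B (Python) =====
-- def deconv(x, b):
--     c = 0
--     for ch in x:
--         d = int(ch) if "0" <= ch <= "9" else ord(ch) - 55
--         c = c * b + d
--     return c
-- ===== Notes on version B (the rewrite author's own statement) =====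
-- stated objective: simpler
-- what changed: Replaced the right-to-left scan maintaining a running power p with a left-to-right Horner accumulation c = c*b + digit, dropping the power variable.
import Mathlib
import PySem

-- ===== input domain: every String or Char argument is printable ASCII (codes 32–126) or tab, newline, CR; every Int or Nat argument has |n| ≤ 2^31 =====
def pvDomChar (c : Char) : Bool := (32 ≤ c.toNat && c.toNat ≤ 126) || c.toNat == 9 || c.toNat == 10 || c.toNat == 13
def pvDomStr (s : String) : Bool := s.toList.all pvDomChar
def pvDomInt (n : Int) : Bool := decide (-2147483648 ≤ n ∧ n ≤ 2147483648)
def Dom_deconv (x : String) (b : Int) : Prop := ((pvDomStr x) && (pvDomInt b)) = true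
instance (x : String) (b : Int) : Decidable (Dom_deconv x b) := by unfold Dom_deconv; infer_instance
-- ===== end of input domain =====

-- B replaces A's right-to-left scan with a running power by a left-to-right Horner accumulation (simpler state).

-- the per-character decode both Pythons share: int(ch) for '0'..'9', else ord(ch)-55
def pvDigit (ch : Char) : Int :=
  if '0' ≤ ch ∧ ch ≤ '9' then (ch.toNat : Int) - 48 else (ch.toNat : Int) - 55

-- ===== PORT A =====
-- A iterates i = len(x)-1 … 0, i.e. over the characters right-to-left, with state (c, p)
def deconv (x : String) (b : Int) : Int :=
  (x.toList.reverse.foldl (fun (s : Int × Int) ch => (s.1 + pvDigit ch * s.2, s.2 * b)) (0, 1)).1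

-- ===== PORT B =====
def deconv_alt (x : String) (b : Int) : Int :=
  x.toList.foldl (fun c ch => c * b + pvDigit ch) 0

-- ===== PRECONDITION & SPEC =====
def Spec_deconv (x : String) (b : Int) (out : Int) : Prop := out = deconv_alt x b
instance (x : String) (b : Int) (out : Int) : Decidable (Spec_deconv x b out) := by unfold Spec_deconv; infer_instance

-- ===== CLAIM (what is proved, stated in full; the proofs are below) =====
def Claim_equal_deconv : Prop := ∀ (x : String) (b : Int), Dom_deconv x b → Spec_deconv x b (deconv x b)

-- ===== LEMMAS AND PROOFS =====

-- Horner fold with arbitrary initial accumulator shifts by a * b^|l|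
theorem horner_shift (b : Int) (l : List Char) (a : Int) :
    l.foldl (fun c ch => c * b + pvDigit ch) a
      = a * b ^ l.length + l.foldl (fun c ch => c * b + pvDigit ch) 0 := by
  induction l generalizing a with
  | nil => simp
  | cons ch t ih =>
    simp only [List.foldl_cons, List.length_cons]
    rw [ih (a * b + pvDigit ch), ih (0 * b + pvDigit ch)]
    ring

-- A's reversed fold computes (c + Horner(l)·p, p·b^|l|)
theorem rev_fold_eq (b : Int) (l : List Char) (c p : Int) :
    l.reverse.foldl (fun (s : Int × Int) ch => (s.1 + pvDigit ch * s.2, s.2 * b)) (c, p)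
      = (c + (l.foldl (fun c ch => c * b + pvDigit ch) 0) * p, p * b ^ l.length) := by
  induction l generalizing c p with
  | nil => simp
  | cons ch t ih =>
    simp only [List.reverse_cons, List.foldl_append, List.foldl_cons, List.foldl_nil,
      List.length_cons, ih]
    rw [horner_shift b t (0 * b + pvDigit ch)]
    refine Prod.ext ?_ ?_ <;> simp <;> ring

-- ===== VERDICT (by name: the statement is the Claim_ definition above) =====
theorem deconv_spec : Claim_equal_deconv := by
  intro x b _
  unfold Spec_deconv deconv deconv_alt
  rw [rev_fold_eq]
  ring
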